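-- pv_equiv track=rewrite | github.com/Tanvir-rahman/problem-solving | test.py | perfectPeak
-- ===== SOURCE A (Python) =====
-- def perfectPeak(A):
--     n = len(A)
--     max_left = [0] * n
--     min_right = [0] * n
--
--     max = A[0]
--     min = A[n - 1]
--     for i in range(1, n + 1):
--         if A[i - 1] > max:
--             max = A[i - 1]
--         max_left[i - 1] = max
--         if A[n - i] < min:
--             min = A[n - i]
--         min_right[n - i - 1] = min
--
--     for i in range(1, n):
--         if max_left[i - 1] < A[i] < min_right[i]:
--             return 1
--     return 0
-- ===== SOURCE B (Python) =====
-- def perfectPeak(A):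
--     n = len(A)
--     runmax = A[0]
--     cand = None  # value of the earliest still-alive candidate peak
--     for i in range(1, n):
--         x = A[i]
--         if cand is not None and x <= cand:
--             cand = None
--         if cand is None and x > runmax and i <= n - 2:
--             cand = x
--         if x > runmax:
--             runmax = x
--     return 1 if cand is not None else 0
-- ===== Notes on version B (the rewrite author's own statement) =====
-- stated objective: alternative
-- what changed: B replaces A's two precomputed arrays (prefix-max and suffix-min) plus a separate scan by a single forward pass with O(1) extra space that maintains a running maximum and a single candidate peak which is discarded as soon as a later element fails to exceed it; no array is ever built.
import Mathlib
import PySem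

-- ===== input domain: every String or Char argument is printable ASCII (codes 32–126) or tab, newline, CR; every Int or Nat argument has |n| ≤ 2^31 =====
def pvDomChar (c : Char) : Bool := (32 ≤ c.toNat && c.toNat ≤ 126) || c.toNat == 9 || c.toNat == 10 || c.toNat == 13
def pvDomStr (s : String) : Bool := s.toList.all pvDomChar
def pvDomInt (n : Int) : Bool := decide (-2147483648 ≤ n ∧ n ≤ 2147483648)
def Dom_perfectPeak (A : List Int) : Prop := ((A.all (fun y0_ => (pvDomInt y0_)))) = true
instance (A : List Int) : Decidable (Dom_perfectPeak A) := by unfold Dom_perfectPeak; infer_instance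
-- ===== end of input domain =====

-- B replaces A's two precomputed arrays plus a scan by one forward pass with a running maximum and
-- a single candidate peak, killed as soon as a later element fails to exceed it. Objective: alternative.

-- ===== PORT A =====
-- the body of A's first for-loop (i runs over range(1, n+1)); state (max, min, max_left, min_right),
-- the two assignments written in Python's order
def pvAStep (A : List Int) (n : Int) (st : Int × Int × List Int × List Int) (i : Int) :
    Int × Int × List Int × List Int :=
  (if PySem.List.pyGetD A (i - 1) 0 > st.1 then PySem.List.pyGetD A (i - 1) 0 else st.1,
   if PySem.List.pyGetD A (n - i) 0 < st.2.1 then PySem.List.pyGetD A (n - i) 0 else st.2.1,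
   PySem.List.pySetD st.2.2.1 (i - 1)
     (if PySem.List.pyGetD A (i - 1) 0 > st.1 then PySem.List.pyGetD A (i - 1) 0 else st.1),
   PySem.List.pySetD st.2.2.2 (n - i - 1)
     (if PySem.List.pyGetD A (n - i) 0 < st.2.1 then PySem.List.pyGetD A (n - i) 0 else st.2.1))

-- A's second for-loop with its early `return 1`
def pvAScan (A mL mR : List Int) : List Int → Int
  | [] => 0
  | i :: rest =>
      if PySem.List.pyGetD mL (i - 1) 0 < PySem.List.pyGetD A i 0
          ∧ PySem.List.pyGetD A i 0 < PySem.List.pyGetD mR i 0 then 1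
      else pvAScan A mL mR rest

def perfectPeak (A : List Int) : Int :=
  let n : Int := A.length
  let st := (PySem.List.pyRange 1 (n + 1) 1).foldl (pvAStep A n)
      (PySem.List.pyGetD A 0 0, PySem.List.pyGetD A (n - 1) 0,
       List.replicate A.length (0 : Int), List.replicate A.length (0 : Int))
  pvAScan A st.2.2.1 st.2.2.2 (PySem.List.pyRange 1 n 1)

-- ===== PORT B =====
-- the body of B's for-loop (i runs over range(1, n)); state (runmax, cand); the three
-- Python `if` statements in order: kill the candidate, adopt a new one, update the running max
def pvBStep (A : List Int) (n : Int) (st : Int × Option Int) (i : Int) : Int × Option Int :=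
  let x := PySem.List.pyGetD A i 0
  let cand1 : Option Int :=
    match st.2 with
    | some c => if x ≤ c then none else some c
    | none => none
  let cand2 : Option Int := if cand1 = none ∧ x > st.1 ∧ i ≤ n - 2 then some x else cand1
  (if x > st.1 then x else st.1, cand2)

def perfectPeak_alt (A : List Int) : Int :=
  let n : Int := A.length
  let st := (PySem.List.pyRange 1 n 1).foldl (pvBStep A n) (PySem.List.pyGetD A 0 0, none)
  if st.2.isSome then 1 else 0

-- ===== PRECONDITION & SPEC =====
-- Pre_ excludes only the empty list, on which the Python A raises IndexError (at A[0]).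
def Pre_perfectPeak (A : List Int) : Prop := A ≠ []
instance (A : List Int) : Decidable (Pre_perfectPeak A) := by unfold Pre_perfectPeak; infer_instance

def pvWitness_perfectPeak : List Int := ([1, 3, 2])

def Spec_perfectPeak (A : List Int) (out : Int) : Prop := out = perfectPeak_alt A
instance (A : List Int) (out : Int) : Decidable (Spec_perfectPeak A out) := by unfold Spec_perfectPeak; infer_instance

-- ===== CLAIM (what is proved, stated in full; the proofs are below) =====
def Claim_equal_perfectPeak : Prop := ∀ (A : List Int), Dom_perfectPeak A → Pre_perfectPeak A → Spec_perfectPeak A (perfectPeak A)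

-- ===== LEMMAS AND PROOFS =====

-- max of A[0..k] (Python prefix max) and min of A[k..] (Python suffix min)
def pvPmax (A : List Int) (k : Nat) : Int :=
  match A.take (k + 1) with
  | [] => 0
  | x :: xs => xs.foldl max x

def pvSmin (A : List Int) (k : Nat) : Int :=
  match A.drop k with
  | [] => 0
  | x :: xs => xs.foldl min x

-- the condition "index i is a perfect peak", shared characterization of both programs
def pvPeak (A : List Int) (i : Nat) : Prop :=
  1 ≤ i ∧ i + 2 ≤ A.length ∧ pvPmax A (i - 1) < A.getD i 0 ∧ A.getD i 0 < pvSmin A (i + 1)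

-- "index i is a strict prefix max and everything in (i, k] exceeds it" — B's alive candidates
def pvAlive (A : List Int) (k i : Nat) : Prop :=
  1 ≤ i ∧ i ≤ k ∧ i + 2 ≤ A.length ∧ pvPmax A (i - 1) < A.getD i 0 ∧
    ∀ j, i < j → j ≤ k → A.getD i 0 < A.getD j 0

lemma pvIfMax (a b : Int) : (if b > a then b else a) = max a b := by
  by_cases h : b > a
  · rw [if_pos h, max_eq_right h.le]
  · rw [if_neg h, max_eq_left (not_lt.mp h)]

lemma pvIfMin (a b : Int) : (if b < a then b else a) = min a b := by
  by_cases h : b < a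
  · rw [if_pos h, min_eq_right h.le]
  · rw [if_neg h, min_eq_left (not_lt.mp h)]

lemma pvPmax_zero (A : List Int) : pvPmax A 0 = A.getD 0 0 := by
  cases A <;> simp [pvPmax, List.getD]

lemma pvPmax_succ (A : List Int) (k : Nat) (h : k + 1 < A.length) :
    pvPmax A (k + 1) = max (pvPmax A k) (A.getD (k + 1) 0) := by
  have ht : A.take (k + 1 + 1) = A.take (k + 1) ++ [A[k + 1]] := by
    rw [List.take_add_one]
    simp [List.getElem?_eq_getElem h]
  have hne : A.take (k + 1) ≠ [] := by
    have : 0 < (A.take (k + 1)).length := by rw [List.length_take]; omega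
    exact List.ne_nil_of_length_pos this
  unfold pvPmax
  rw [ht]
  rcases hh : A.take (k + 1) with _ | ⟨x, xs⟩
  · exact absurd hh hne
  · simp [List.foldl_append, List.getD_eq_getElem?_getD, List.getElem?_eq_getElem h]

lemma pvPmax_step (A : List Int) (k : Nat) (h : k < A.length) :
    max (pvPmax A (k - 1)) (A.getD k 0) = pvPmax A k := by
  rcases k with _ | k
  · simp [pvPmax_zero]
  · rw [Nat.succ_sub_one, pvPmax_succ A k h]

lemma pvPmax_ge (A : List Int) (i k : Nat) (hik : i ≤ k) (hk : k < A.length) :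
    A.getD i 0 ≤ pvPmax A k := by
  have hi : i < A.length := by omega
  have hmem : A.getD i 0 ∈ A.take (k + 1) := by
    rw [List.getD_eq_getElem A 0 hi]
    have : A[i] = (A.take (k + 1))[i]'(by rw [List.length_take]; omega) := by
      rw [List.getElem_take]
    rw [this]
    exact List.getElem_mem _
  unfold pvPmax
  rcases hh : A.take (k + 1) with _ | ⟨x, xs⟩
  · rw [hh] at hmem; simp at hmem
  · rw [hh] at hmem
    rcases (by simpa using hmem : A.getD i 0 = x ∨ A.getD i 0 ∈ xs) with h | h
    · rw [h]; exact (PySem.List.le_foldl_max xs x).1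
    · exact (PySem.List.le_foldl_max xs x).2 _ h

lemma pvSmin_single (A : List Int) (h : A ≠ []) :
    pvSmin A (A.length - 1) = A.getD (A.length - 1) 0 := by
  have hlen : 0 < A.length := List.length_pos_of_ne_nil h
  have hd : A.drop (A.length - 1) = [A[A.length - 1]] := by
    rw [List.drop_eq_getElem_cons (by omega)]
    have h1 : A.length - 1 + 1 = A.length := by omega
    simp [h1]
  unfold pvSmin
  rw [hd]
  simp [List.getD_eq_getElem?_getD,
    List.getElem?_eq_getElem (show A.length - 1 < A.length by omega)]

lemma pvSmin_step (A : List Int) (k : Nat) (h : k + 1 < A.length) :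
    pvSmin A k = min (A.getD k 0) (pvSmin A (k + 1)) := by
  have hd : A.drop k = A[k] :: A.drop (k + 1) := List.drop_eq_getElem_cons (by omega)
  have hd2 : A.drop (k + 1) = A[k + 1] :: A.drop (k + 2) := List.drop_eq_getElem_cons h
  unfold pvSmin
  rw [hd, hd2]
  simp only [List.foldl_cons]
  rw [List.foldl_assoc (op := min), List.getD_eq_getElem A 0 (by omega : k < A.length)]

lemma pvSmin_zero_le (A : List Int) (y : Int) (h : y ∈ A) : pvSmin A 0 ≤ y := by
  unfold pvSmin
  rcases hA : A with _ | ⟨x, xs⟩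
  · simp [hA] at h
  · simp only [List.drop_zero]
    rcases (by simpa [hA] using h : y = x ∨ y ∈ xs) with rfl | hy
    · exact (PySem.List.foldl_min_le xs y).1
    · exact (PySem.List.foldl_min_le xs x).2 y hy

-- "x is below the suffix min from k" = "x is below every element at index ≥ k"
lemma pvSmin_lt_iff (A : List Int) (x : Int) :
    ∀ (d k : Nat), k < A.length → A.length - 1 - k ≤ d →
      (x < pvSmin A k ↔ ∀ j, k ≤ j → j < A.length → x < A.getD j 0) := by
  intro d
  induction d with
  | zero =>
      intro k hk hd
      have hke : k = A.length - 1 := by omega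
      have hA : A ≠ [] := List.ne_nil_of_length_pos (by omega)
      subst hke
      rw [pvSmin_single A hA]
      constructor
      · intro h j hj1 hj2
        have : j = A.length - 1 := by omega
        rwa [this]
      · intro h; exact h _ le_rfl (by omega)
  | succ d ih =>
      intro k hk hd
      by_cases hlast : k + 1 < A.length
      · rw [pvSmin_step A k hlast, lt_min_iff, ih (k + 1) hlast (by omega)]
        constructor
        · rintro ⟨h1, h2⟩ j hj1 hj2
          rcases eq_or_lt_of_le hj1 with rfl | hj
          · exact h1
          · exact h2 j (by omega) hj2
        · intro h
          exact ⟨h k le_rfl hk, fun j hj1 hj2 => h j (by omega) hj2⟩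
      · exact ih k hk (by omega)

lemma pvGetD_set (xs : List Int) (i j : Nat) (v : Int) (hi : i < xs.length) :
    (xs.set i v).getD j 0 = if j = i then v else xs.getD j 0 := by
  simp only [List.getD_eq_getElem?_getD, List.getElem?_set]
  by_cases h : j = i
  · subst h; simp [hi]
  · have h' : ¬ i = j := fun hh => h hh.symm
    simp [h, h']

lemma pvGetD_replicate (n j : Nat) : (List.replicate n (0 : Int)).getD j 0 = 0 := by
  simp only [List.getD_eq_getElem?_getD, List.getElem?_replicate]
  split <;> simp

lemma pvSetD_neg_one (xs : List Int) (v : Int) (h : xs ≠ []) :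
    PySem.List.pySetD xs (-1) v = xs.set (xs.length - 1) v := by
  have hlen : 0 < xs.length := List.length_pos_of_ne_nil h
  simp only [PySem.List.pySetD, PySem.List.pySet?, PySem.List.pyIdx?]
  split_ifs <;> simp_all

-- invariant of A's first loop after the iterations i = 1 .. k
def pvAFillInv (A : List Int) (k : Nat) (st : Int × Int × List Int × List Int) : Prop :=
  st.1 = pvPmax A (k - 1) ∧
  st.2.1 = pvSmin A (A.length - 1 - (k - 1)) ∧
  st.2.2.1.length = A.length ∧ st.2.2.2.length = A.length ∧
  (∀ j : Nat, j < A.length → st.2.2.1.getD j 0 = if j < k then pvPmax A j else 0) ∧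
  (∀ j : Nat, j < A.length →
      st.2.2.2.getD j 0 =
        if k = A.length then (if j = A.length - 1 then pvSmin A 0 else pvSmin A (j + 1))
        else if A.length - 1 - k ≤ j ∧ j + 2 ≤ A.length then pvSmin A (j + 1) else 0)

-- min of A over a window shrinking from the right end, as A's loop computes it
lemma pvMin_step (A : List Int) (hA : A ≠ []) (k : Nat) (hk : k < A.length) :
    min (pvSmin A (A.length - 1 - (k - 1))) (A.getD (A.length - (k + 1)) 0)
      = pvSmin A (A.length - 1 - k) := by
  rcases k with _ | k
  · simp only [Nat.zero_sub, Nat.sub_zero, Nat.zero_add]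
    rw [pvSmin_single A hA]
    simp
  · have e1 : A.length - 1 - (k + 1 - 1) = A.length - (k + 2) + 1 := by omega
    have e2 : A.length - 1 - (k + 1) = A.length - (k + 2) := by omega
    have e3 : A.length - (k + 1 + 1) = A.length - (k + 2) := by omega
    rw [e1, e2, e3, min_comm, ← pvSmin_step A (A.length - (k + 2)) (by omega)]

lemma pvAStep_inv (A : List Int) (hA : A ≠ []) (k : Nat) (hk : k < A.length)
    (st : Int × Int × List Int × List Int) (h : pvAFillInv A k st) :
    pvAFillInv A (k + 1) (pvAStep A A.length st ((k + 1 : Nat) : Int)) := by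
  obtain ⟨hmx, hmn, hlL, hlR, hL, hR⟩ := h
  have hlen : 0 < A.length := List.length_pos_of_ne_nil hA
  have e1 : ((k + 1 : Nat) : Int) - 1 = ((k : Nat) : Int) := by omega
  have e2 : (A.length : Int) - ((k + 1 : Nat) : Int) = ((A.length - (k + 1) : Nat) : Int) := by
    omega
  have hvmx : (if PySem.List.pyGetD A ((k : Nat) : Int) 0 > st.1
      then PySem.List.pyGetD A ((k : Nat) : Int) 0 else st.1) = pvPmax A k := by
    rw [PySem.List.pyGetD_natCast, hmx, pvIfMax, pvPmax_step A k hk]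
  have hvmn : (if PySem.List.pyGetD A (((A.length - (k + 1) : Nat) : Int)) 0 < st.2.1
      then PySem.List.pyGetD A (((A.length - (k + 1) : Nat) : Int)) 0 else st.2.1)
      = pvSmin A (A.length - 1 - k) := by
    rw [PySem.List.pyGetD_natCast, hmn, pvIfMin, pvMin_step A hA k hk]
  refine ⟨?_, ?_, ?_, ?_, ?_, ?_⟩
  · show (if _ > st.1 then _ else st.1) = pvPmax A (k + 1 - 1)
    rw [e1, hvmx, show k + 1 - 1 = k from by omega]
  · show (if _ < st.2.1 then _ else st.2.1) = pvSmin A (A.length - 1 - (k + 1 - 1))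
    rw [e2, hvmn, show A.length - 1 - (k + 1 - 1) = A.length - 1 - k from by omega]
  · show (PySem.List.pySetD st.2.2.1 (((k + 1 : Nat) : Int) - 1) _).length = A.length
    rw [e1, PySem.List.pySetD_natCast, List.length_set, hlL]
  · show (PySem.List.pySetD st.2.2.2 ((A.length : Int) - ((k + 1 : Nat) : Int) - 1) _).length
        = A.length
    by_cases hlast : k + 1 < A.length
    · have e3 : (A.length : Int) - ((k + 1 : Nat) : Int) - 1
          = ((A.length - (k + 2) : Nat) : Int) := by omega
      rw [e3, PySem.List.pySetD_natCast, List.length_set, hlR]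
    · have e3 : (A.length : Int) - ((k + 1 : Nat) : Int) - 1 = -1 := by omega
      have hRne : st.2.2.2 ≠ [] := by
        intro hnil; rw [hnil] at hlR; simp at hlR; omega
      rw [e3, pvSetD_neg_one _ _ hRne, List.length_set, hlR]
  · intro j hj
    show (PySem.List.pySetD st.2.2.1 (((k + 1 : Nat) : Int) - 1) _).getD j 0 = _
    rw [e1, PySem.List.pySetD_natCast, hvmx,
      pvGetD_set st.2.2.1 k j (pvPmax A k) (by rw [hlL]; omega), hL j hj]
    by_cases h1 : j = k
    · rw [if_pos h1, if_pos (by omega), h1]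
    · rw [if_neg h1]
      by_cases h2 : j < k
      · rw [if_pos h2, if_pos (by omega)]
      · rw [if_neg h2, if_neg (by omega)]
  · intro j hj
    show (PySem.List.pySetD st.2.2.2 ((A.length : Int) - ((k + 1 : Nat) : Int) - 1) _).getD j 0 = _
    by_cases hlast : k + 1 < A.length
    · have e3 : (A.length : Int) - ((k + 1 : Nat) : Int) - 1
          = ((A.length - (k + 2) : Nat) : Int) := by omega
      rw [e3, e2, PySem.List.pySetD_natCast, hvmn,
        pvGetD_set st.2.2.2 (A.length - (k + 2)) j _ (by rw [hlR]; omega), hR j hj]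
      rw [if_neg (by omega : ¬ k + 1 = A.length), if_neg (by omega : ¬ k = A.length)]
      by_cases hje : j = A.length - (k + 2)
      · rw [if_pos hje, if_pos (by omega)]
        have : A.length - 1 - k = j + 1 := by omega
        rw [this]
      · rw [if_neg hje]
        split_ifs <;> first | rfl | omega
    · have hke : k + 1 = A.length := by omega
      have e3 : (A.length : Int) - ((k + 1 : Nat) : Int) - 1 = -1 := by omega
      have hRne : st.2.2.2 ≠ [] := by
        intro hnil; rw [hnil] at hlR; simp at hlR; omega
      rw [e3, pvSetD_neg_one _ _ hRne, hlR, e2, hvmn,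
        pvGetD_set st.2.2.2 (A.length - 1) j _ (by rw [hlR]; omega), hR j hj]
      rw [if_pos hke, if_neg (by omega : ¬ k = A.length)]
      by_cases hje : j = A.length - 1
      · rw [if_pos hje, if_pos hje]
        have : A.length - 1 - k = 0 := by omega
        rw [this]
      · rw [if_neg hje, if_neg hje, if_pos (by omega)]

lemma pvAFill_inv (A : List Int) (hA : A ≠ []) (k : Nat) (hk : k ≤ A.length) :
    pvAFillInv A k ((PySem.List.pyRange 1 ((k : Int) + 1) 1).foldl (pvAStep A A.length)
      (PySem.List.pyGetD A 0 0, PySem.List.pyGetD A ((A.length : Int) - 1) 0,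
       List.replicate A.length (0 : Int), List.replicate A.length (0 : Int))) := by
  induction k with
  | zero =>
      rw [PySem.List.pyRange_one_eq_nil (by norm_num)]
      have hlen : 0 < A.length := List.length_pos_of_ne_nil hA
      refine ⟨?_, ?_, by simp, by simp, ?_, ?_⟩
      · simp [pvPmax_zero, PySem.List.pyGetD_zero]
      · have h0 : ((A.length : Int) - 1) = ((A.length - 1 : Nat) : Int) := by omega
        show PySem.List.pyGetD A ((A.length : Int) - 1) 0 = _
        rw [h0, PySem.List.pyGetD_natCast]
        have h1 : A.length - 1 - (0 - 1) = A.length - 1 := by omega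
        rw [h1, pvSmin_single A hA]
      · intro j hj; simp
      · intro j hj
        show (List.replicate A.length (0 : Int)).getD j 0 = _
        rw [pvGetD_replicate, if_neg (by omega : ¬ (0 = A.length)),
          if_neg (by omega : ¬ (A.length - 1 - 0 ≤ j ∧ j + 2 ≤ A.length))]
  | succ k ih =>
      have hcast : ((k + 1 : Nat) : Int) + 1 = ((k : Int) + 1) + 1 := by push_cast; ring
      rw [hcast, PySem.List.pyRange_one_succ_right (by omega : (1 : Int) ≤ (k : Int) + 1),
        List.foldl_append]
      have hc2 : ((k : Int) + 1) = ((k + 1 : Nat) : Int) := by push_cast; ring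
      rw [List.foldl_cons, List.foldl_nil, hc2]
      exact pvAStep_inv A hA k (by omega) _ (ih (by omega))

-- A's scan is 0/1-valued and returns 1 exactly when some tested index satisfies the condition
lemma pvAScan_zero_or_one (A mL mR : List Int) (l : List Int) :
    pvAScan A mL mR l = 0 ∨ pvAScan A mL mR l = 1 := by
  induction l with
  | nil => left; rfl
  | cons i rest ih =>
      unfold pvAScan
      split_ifs
      · right; rfl
      · exact ih

lemma pvAScan_eq_one_iff (A mL mR : List Int) (l : List Int) :
    pvAScan A mL mR l = 1 ↔ ∃ i ∈ l,
      PySem.List.pyGetD mL (i - 1) 0 < PySem.List.pyGetD A i 0 ∧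
        PySem.List.pyGetD A i 0 < PySem.List.pyGetD mR i 0 := by
  induction l with
  | nil => simp [pvAScan]
  | cons i rest ih =>
      unfold pvAScan
      split_ifs with h
      · constructor
        · intro _; exact ⟨i, List.mem_cons_self, h⟩
        · intro _; rfl
      · rw [ih]
        constructor
        · rintro ⟨j, hj, hc⟩; exact ⟨j, List.mem_cons_of_mem i hj, hc⟩
        · rintro ⟨j, hj, hc⟩
          rcases List.mem_cons.mp hj with rfl | hj'
          · exact absurd hc h
          · exact ⟨j, hj', hc⟩

-- A returns 1 exactly when a perfect peak exists
lemma pvA_eq_one_iff (A : List Int) (hA : A ≠ []) :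
    perfectPeak A = 1 ↔ ∃ i : Nat, pvPeak A i := by
  have hlen : 0 < A.length := List.length_pos_of_ne_nil hA
  unfold perfectPeak
  obtain ⟨-, -, -, -, hL, hR⟩ := pvAFill_inv A hA A.length le_rfl
  rw [pvAScan_eq_one_iff]
  constructor
  · rintro ⟨i, hmem, hc1, hc2⟩
    obtain ⟨hi1, hi2⟩ := (PySem.List.mem_pyRange_one).mp hmem
    set m := i.toNat with hm
    have him : i = (m : Int) := by omega
    have hmn : m < A.length := by omega
    have hm1 : 1 ≤ m := by omega
    rw [him] at hc1 hc2
    rw [show (m : Int) - 1 = ((m - 1 : Nat) : Int) from by omega] at hc1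
    rw [PySem.List.pyGetD_natCast, PySem.List.pyGetD_natCast] at hc1
    rw [PySem.List.pyGetD_natCast, PySem.List.pyGetD_natCast] at hc2
    rw [hL (m - 1) (by omega), if_pos (by omega)] at hc1
    rw [hR m hmn, if_pos rfl] at hc2
    by_cases hml : m = A.length - 1
    · rw [if_pos hml] at hc2
      have hmemA : A.getD m 0 ∈ A := by
        rw [List.getD_eq_getElem A 0 hmn]; exact List.getElem_mem _
      exact absurd hc2 (not_lt.mpr (pvSmin_zero_le A _ hmemA))
    · rw [if_neg hml] at hc2
      exact ⟨m, hm1, by omega, hc1, hc2⟩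
  · rintro ⟨m, hm1, hm2, hc1, hc2⟩
    refine ⟨(m : Int), PySem.List.mem_pyRange_one.mpr ⟨by omega, by omega⟩, ?_, ?_⟩
    · rw [show (m : Int) - 1 = ((m - 1 : Nat) : Int) from by omega,
        PySem.List.pyGetD_natCast, PySem.List.pyGetD_natCast,
        hL (m - 1) (by omega), if_pos (by omega)]
      exact hc1
    · rw [PySem.List.pyGetD_natCast, PySem.List.pyGetD_natCast,
        hR m (by omega), if_pos rfl, if_neg (by omega : ¬ m = A.length - 1)]
      exact hc2

-- invariant of B's loop after the iterations i = 1 .. k: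
-- runmax is the prefix max, and cand holds the value of the least alive candidate (or none)
def pvBInv (A : List Int) (k : Nat) (st : Int × Option Int) : Prop :=
  st.1 = pvPmax A k ∧
  ((st.2 = none ∧ ∀ i, ¬ pvAlive A k i) ∨
   (∃ i, st.2 = some (A.getD i 0) ∧ pvAlive A k i ∧ ∀ i', pvAlive A k i' → i ≤ i'))

lemma pvAlive_mono (A : List Int) (k i : Nat) (h : pvAlive A (k + 1) i) (hik : i ≤ k) :
    pvAlive A k i := by
  obtain ⟨h1, _, h3, h4, h5⟩ := h
  exact ⟨h1, hik, h3, h4, fun j hj1 hj2 => h5 j hj1 (by omega)⟩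

lemma pvBStep_none (A : List Int) (n r : Int) (i : Int) :
    pvBStep A n (r, none) i =
      (if PySem.List.pyGetD A i 0 > r then PySem.List.pyGetD A i 0 else r,
       if PySem.List.pyGetD A i 0 > r ∧ i ≤ n - 2 then some (PySem.List.pyGetD A i 0)
       else none) := by
  simp [pvBStep]

lemma pvBStep_some (A : List Int) (n r c : Int) (i : Int) :
    pvBStep A n (r, some c) i =
      (if PySem.List.pyGetD A i 0 > r then PySem.List.pyGetD A i 0 else r,
       if PySem.List.pyGetD A i 0 ≤ c then
         (if PySem.List.pyGetD A i 0 > r ∧ i ≤ n - 2 then some (PySem.List.pyGetD A i 0)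
          else none)
       else some c) := by
  by_cases hxc : PySem.List.pyGetD A i 0 ≤ c
  · simp [pvBStep, hxc]
  · simp [pvBStep, hxc]

lemma pvBStep_inv (A : List Int) (k : Nat) (hk : k + 2 ≤ A.length)
    (st : Int × Option Int) (h : pvBInv A k st) :
    pvBInv A (k + 1) (pvBStep A A.length st ((k + 1 : Nat) : Int)) := by
  obtain ⟨r, c⟩ := st
  obtain ⟨hmx, hcand⟩ := h
  simp only at hmx
  have hx : PySem.List.pyGetD A ((k + 1 : Nat) : Int) 0 = A.getD (k + 1) 0 :=
    PySem.List.pyGetD_natCast A (k + 1) 0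
  have hrun : (if A.getD (k + 1) 0 > r then A.getD (k + 1) 0 else r) = pvPmax A (k + 1) := by
    rw [hmx, pvIfMax]
    exact (pvPmax_succ A k (by omega)).symm
  rcases hcand with ⟨hnone, hdead⟩ | ⟨i0, hsome, halive, hleast⟩
  · -- no candidate alive after k
    simp only at hnone
    subst hnone
    rw [pvBStep_none, hx]
    by_cases hnew : A.getD (k + 1) 0 > r ∧
        ((k + 1 : Nat) : Int) ≤ (A.length : Int) - 2
    · rw [if_pos hnew]
      refine ⟨hrun, Or.inr ⟨k + 1, rfl, ?_, ?_⟩⟩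
      · refine ⟨by omega, le_rfl, by omega, ?_, by omega⟩
        rw [show k + 1 - 1 = k from rfl, ← hmx]
        exact hnew.1
      · intro i' hi'
        by_contra hlt
        exact hdead i' (pvAlive_mono A k i' hi' (by omega))
    · rw [if_neg hnew]
      refine ⟨hrun, Or.inl ⟨rfl, ?_⟩⟩
      intro i hi
      by_cases hik : i ≤ k
      · exact hdead i (pvAlive_mono A k i hi hik)
      · obtain ⟨h1, h2, h3, h4, h5⟩ := hi
        have hie : i = k + 1 := by omega
        subst hie
        rw [show k + 1 - 1 = k from rfl, ← hmx] at h4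
        exact hnew ⟨by omega, by omega⟩
  · -- candidate i0 alive after k, value A[i0], least alive
    simp only at hsome
    subst hsome
    obtain ⟨hi01, hi0k, hi0n, hi0p, hi0gt⟩ := halive
    have hx0le : A.getD i0 0 ≤ pvPmax A k := pvPmax_ge A i0 k hi0k (by omega)
    rw [pvBStep_some, hx]
    by_cases hkill : A.getD (k + 1) 0 ≤ A.getD i0 0
    · have hnk : ¬ (A.getD (k + 1) 0 > r ∧ ((k + 1 : Nat) : Int) ≤ (A.length : Int) - 2) := by
        rw [hmx]
        omega
      rw [if_pos hkill, if_neg hnk]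
      refine ⟨hrun, Or.inl ⟨rfl, ?_⟩⟩
      intro i hi
      obtain ⟨h1, h2, h3, h4, h5⟩ := hi
      by_cases hik : i ≤ k
      · -- i was alive at k, so i0 ≤ i and A[i] ≥ A[i0]; but A[k+1] ≤ A[i0] kills it
        have hialive : pvAlive A k i :=
          ⟨h1, hik, h3, h4, fun j hj1 hj2 => h5 j hj1 (by omega)⟩
        have hi0i : i0 ≤ i := hleast i hialive
        have hxi : A.getD i 0 < A.getD (k + 1) 0 := h5 (k + 1) (by omega) le_rfl
        rcases eq_or_lt_of_le hi0i with rfl | hlt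
        · omega
        · have : A.getD i0 0 ≤ pvPmax A (i - 1) := pvPmax_ge A i0 (i - 1) (by omega) (by omega)
          omega
      · have hie : i = k + 1 := by omega
        subst hie
        rw [show k + 1 - 1 = k from rfl, ← hmx] at h4
        omega
    · rw [if_neg hkill]
      refine ⟨hrun, Or.inr ⟨i0, rfl, ?_, ?_⟩⟩
      · refine ⟨hi01, by omega, hi0n, hi0p, ?_⟩
        intro j hj1 hj2
        by_cases hjk : j ≤ k
        · exact hi0gt j hj1 hjk
        · have : j = k + 1 := by omega
          subst this
          omega
      · intro i' hi'
        by_cases hik : i' ≤ k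
        · exact hleast i' (pvAlive_mono A k i' hi' hik)
        · omega

lemma pvBFold_inv (A : List Int) (hA : A ≠ []) (k : Nat) (hk : k ≤ A.length - 1) :
    pvBInv A k ((PySem.List.pyRange 1 ((k : Int) + 1) 1).foldl (pvBStep A A.length)
      (PySem.List.pyGetD A 0 0, none)) := by
  have hlen : 0 < A.length := List.length_pos_of_ne_nil hA
  induction k with
  | zero =>
      rw [PySem.List.pyRange_one_eq_nil (by norm_num)]
      refine ⟨by simp [pvPmax_zero, PySem.List.pyGetD_zero], Or.inl ⟨rfl, ?_⟩⟩
      rintro i ⟨h1, h2, -⟩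
      omega
  | succ k ih =>
      have hcast : ((k + 1 : Nat) : Int) + 1 = ((k : Int) + 1) + 1 := by push_cast; ring
      rw [hcast, PySem.List.pyRange_one_succ_right (by omega : (1 : Int) ≤ (k : Int) + 1),
        List.foldl_append, List.foldl_cons, List.foldl_nil,
        show ((k : Int) + 1) = ((k + 1 : Nat) : Int) from by push_cast; ring]
      exact pvBStep_inv A k (by omega) _ (ih (by omega))

-- being alive through the whole array is exactly being a perfect peak
lemma pvAlive_last_iff (A : List Int) (hA : A ≠ []) (i : Nat) :
    pvAlive A (A.length - 1) i ↔ pvPeak A i := by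
  have hlen : 0 < A.length := List.length_pos_of_ne_nil hA
  constructor
  · rintro ⟨h1, h2, h3, h4, h5⟩
    refine ⟨h1, h3, h4, ?_⟩
    rw [pvSmin_lt_iff A _ (A.length - 1 - (i + 1)) (i + 1) (by omega) (by omega)]
    intro j hj1 hj2
    exact h5 j (by omega) (by omega)
  · rintro ⟨h1, h2, h3, h4⟩
    refine ⟨h1, by omega, h2, h3, ?_⟩
    intro j hj1 hj2
    exact (pvSmin_lt_iff A _ (A.length - 1 - (i + 1)) (i + 1) (by omega) (by omega)).mp h4
      j (by omega) (by omega)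

-- B returns 1 exactly when a perfect peak exists, and is 0/1-valued
lemma pvB_eq_one_iff (A : List Int) (hA : A ≠ []) :
    perfectPeak_alt A = 1 ↔ ∃ i : Nat, pvPeak A i := by
  have hlen : 0 < A.length := List.length_pos_of_ne_nil hA
  have hrange : (A.length : Int) = (((A.length - 1 : Nat) : Int) + 1) := by omega
  have hdef : perfectPeak_alt A =
      if ((PySem.List.pyRange 1 (((A.length - 1 : Nat) : Int) + 1) 1).foldl
            (pvBStep A (A.length : Int))
            (PySem.List.pyGetD A 0 0, none)).2.isSome then 1 else 0 := by
    rw [← hrange]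
    rfl
  rw [hdef]
  obtain ⟨-, hcand⟩ := pvBFold_inv A hA (A.length - 1) le_rfl
  rcases hcand with ⟨hnone, hdead⟩ | ⟨i0, hsome, halive, -⟩
  · rw [hnone]
    simp only [Option.isSome_none, Bool.false_eq_true, if_false]
    constructor
    · intro h; exact absurd h (by norm_num)
    · rintro ⟨i, hp⟩
      exact absurd ((pvAlive_last_iff A hA i).mpr hp) (hdead i)
  · rw [hsome]
    refine ⟨fun _ => ⟨i0, (pvAlive_last_iff A hA i0).mp halive⟩, fun _ => ?_⟩
    simp

lemma pvB_zero_or_one (A : List Int) :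
    perfectPeak_alt A = 0 ∨ perfectPeak_alt A = 1 := by
  have hdef : perfectPeak_alt A =
      if ((PySem.List.pyRange 1 (A.length : Int) 1).foldl (pvBStep A (A.length : Int))
            (PySem.List.pyGetD A 0 0, none)).2.isSome then 1 else 0 := rfl
  rw [hdef]
  split_ifs
  · right; rfl
  · left; rfl

-- ===== VERDICT (by name: the statement is the Claim_ definition above) =====
theorem perfectPeak_spec : Claim_equal_perfectPeak := by
  intro A _ hpre
  have hA : A ≠ [] := hpre
  unfold Spec_perfectPeak
  by_cases h : ∃ i : Nat, pvPeak A i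
  · rw [(pvA_eq_one_iff A hA).mpr h, (pvB_eq_one_iff A hA).mpr h]
  · have hB : perfectPeak_alt A = 0 := by
      rcases pvB_zero_or_one A with h0 | h1
      · exact h0
      · exact absurd ((pvB_eq_one_iff A hA).mp h1) h
    have hAv : perfectPeak A = 0 := by
      have := pvA_eq_one_iff A hA
      unfold perfectPeak at this ⊢
      rcases pvAScan_zero_or_one A _ _ _ with h0 | h1
      · exact h0
      · exact absurd (this.mp h1) h
    rw [hAv, hB]
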